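-- pv_equiv track=rewrite | github.com/ustankie/ASD | holidays/offliny 2021-22/offline9/zad9_1.py | transform
-- ===== SOURCE A (Python) =====
-- def findmax(E):
--     m=len(E)
--     maxi=0
--     max_weight=0
--     for i in range(m):
--         maxi=max(E[i][0],E[i][1],maxi)
--         max_weight=max(max_weight,E[i][2])
--     return maxi
--
-- def transform(E,s):
--     m=len(E)
--     maxi=findmax(E)
--     max_cap=0
--
--     n=maxi+2
--     G=[[0 for _ in range(n)]for _ in range(n)]
--     for i in range(m):
--         #if E[i][1]!=s:
--         G[E[i][0]][E[i][1]]=E[i][2]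
--         # if E[i][0]!=s:
--         #     G[E[i][1]][E[i][0]]=E[i][2]
--     capacity=[0 for _ in range(n)]
--     for i in range(n):
--         for j in range(n):
--             capacity[j]+=G[i][j]
--     max_cap=max(capacity)
--     return G,max_cap,capacity
-- ===== SOURCE B (Python) =====
-- def transform(E, s):
--     maxi = 0
--     for u, v, w in E:
--         maxi = max(u, v, maxi)
--     n = maxi + 2
--     G = [[0] * n for _ in range(n)]
--     capacity = [0] * n
--     for u, v, w in E:
--         capacity[v] += w - G[u][v]
--         G[u][v] = w
--     max_cap = max(capacity)
--     return G, max_cap, capacity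
-- ===== Notes on version B (the rewrite author's own statement) =====
-- stated objective: faster
-- what changed: B fuses the capacity computation into the single edge loop (reading the old cell before overwriting it, so duplicate edges contribute only their final weight) and drops A's n x n column-sum scan and the separate findmax helper entirely.
-- outside the precondition, e.g. on transform([(-5, 0, 1)], 0): A raises IndexError, B raises IndexError
import Mathlib
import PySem

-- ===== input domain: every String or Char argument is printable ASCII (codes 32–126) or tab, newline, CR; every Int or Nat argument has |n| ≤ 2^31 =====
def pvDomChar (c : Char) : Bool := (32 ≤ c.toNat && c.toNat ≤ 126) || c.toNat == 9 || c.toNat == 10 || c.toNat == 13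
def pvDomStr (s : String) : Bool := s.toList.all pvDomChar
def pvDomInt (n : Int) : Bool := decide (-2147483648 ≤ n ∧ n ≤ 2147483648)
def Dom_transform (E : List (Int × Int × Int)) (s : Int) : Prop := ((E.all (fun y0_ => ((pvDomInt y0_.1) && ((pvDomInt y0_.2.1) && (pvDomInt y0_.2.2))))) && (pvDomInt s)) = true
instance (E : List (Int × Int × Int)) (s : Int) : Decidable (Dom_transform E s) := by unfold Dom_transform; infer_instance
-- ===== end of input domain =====

-- B fuses the capacity computation into the edge loop (subtracting the overwritten cell), removing A's n×n column-sum scan: a constant-factor speedup; return values identical on Pre_.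

-- ===== PORT A =====
def findmax (E : List (Int × Int × Int)) : Int :=
  let m : Int := E.length
  let st := (PySem.List.pyRange 0 m).foldl (fun (st : Int × Int) i =>
      let e := PySem.List.pyGetD E i (0, 0, 0)
      (max (max e.1 e.2.1) st.1, max st.2 e.2.2)) (0, 0)
  st.1

def transform (E : List (Int × Int × Int)) (s : Int) : List (List Int) × Int × List Int :=
  let m : Int := E.length
  let maxi := findmax E
  let n : Int := maxi + 2
  let G0 : List (List Int) := (PySem.List.pyRange 0 n).map (fun _ => (PySem.List.pyRange 0 n).map (fun _ => (0 : Int)))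
  let G := (PySem.List.pyRange 0 m).foldl (fun G i =>
      let e := PySem.List.pyGetD E i (0, 0, 0)
      PySem.List.pySetD G e.1 (PySem.List.pySetD (PySem.List.pyGetD G e.1 []) e.2.1 e.2.2)) G0
  let cap0 : List Int := (PySem.List.pyRange 0 n).map (fun _ => (0 : Int))
  let capacity := (PySem.List.pyRange 0 n).foldl (fun cap i =>
      (PySem.List.pyRange 0 n).foldl (fun cap j =>
        PySem.List.pySetD cap j (PySem.List.pyGetD cap j 0 + PySem.List.pyGetD (PySem.List.pyGetD G i []) j 0)) cap) cap0
  let max_cap := (PySem.List.max? capacity (fun x => x)).getD 0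
  (G, max_cap, capacity)

-- ===== PORT B =====
def transform_alt (E : List (Int × Int × Int)) (s : Int) : List (List Int) × Int × List Int :=
  let maxi := E.foldl (fun a e => max (max e.1 e.2.1) a) 0
  let n : Int := maxi + 2
  let G0 : List (List Int) := (PySem.List.pyRange 0 n).map (fun _ => PySem.List.pyRepeat [(0 : Int)] n)
  let cap0 : List Int := PySem.List.pyRepeat [(0 : Int)] n
  let st := E.foldl (fun (st : List (List Int) × List Int) e =>
      let cap' := PySem.List.pySetD st.2 e.2.1
        (PySem.List.pyGetD st.2 e.2.1 0 + e.2.2 - PySem.List.pyGetD (PySem.List.pyGetD st.1 e.1 []) e.2.1 0)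
      let G' := PySem.List.pySetD st.1 e.1 (PySem.List.pySetD (PySem.List.pyGetD st.1 e.1 []) e.2.1 e.2.2)
      (G', cap')) (G0, cap0)
  let max_cap := (PySem.List.max? st.2 (fun x => x)).getD 0
  (st.1, max_cap, st.2)

-- ===== PRECONDITION & SPEC =====
def pvMaxV (E : List (Int × Int × Int)) : Int := E.foldl (fun a e => max (max e.1 e.2.1) a) 0

-- Pre_ excludes exactly the inputs where A raises IndexError: an edge endpoint below -(maxVertex+2) wraps past the front of the matrix.
def Pre_transform (E : List (Int × Int × Int)) (s : Int) : Prop :=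
  ∀ e ∈ E, -(pvMaxV E + 2) ≤ e.1 ∧ -(pvMaxV E + 2) ≤ e.2.1
instance (E : List (Int × Int × Int)) (s : Int) : Decidable (Pre_transform E s) := by unfold Pre_transform; infer_instance

def pvWitness_transform : (List (Int × Int × Int)) × Int := ([(0, 1, 5), (1, 0, 3), (0, 1, 2)], 0)

def Spec_transform (E : List (Int × Int × Int)) (s : Int) (out : List (List Int) × Int × List Int) : Prop := out = transform_alt E s
instance (E : List (Int × Int × Int)) (s : Int) (out : List (List Int) × Int × List Int) : Decidable (Spec_transform E s out) := by unfold Spec_transform; infer_instance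

-- ===== CLAIM (what is proved, stated in full; the proofs are below) =====
def Claim_equal_transform : Prop := ∀ (E : List (Int × Int × Int)) (s : Int), Dom_transform E s → Pre_transform E s → Spec_transform E s (transform E s)

-- ===== LEMMAS AND PROOFS =====

-- column sum of G at column j
def csum (G : List (List Int)) (j : ℕ) : Int := (G.map (fun r => r.getD j 0)).sum

-- resolved (Python) index
def rIdx (N : ℕ) (i : Int) : ℕ := if 0 ≤ i then i.toNat else N - (-i).toNat

-- the G-update of one edge (shared shape of both ports' loop bodies)
def stepG (G : List (List Int)) (e : Int × Int × Int) : List (List Int) :=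
  PySem.List.pySetD G e.1 (PySem.List.pySetD (PySem.List.pyGetD G e.1 []) e.2.1 e.2.2)

-- B's loop body: the same G-update plus the incremental capacity update
def stepB (st : List (List Int) × List Int) (e : Int × Int × Int) : List (List Int) × List Int :=
  (stepG st.1 e,
   PySem.List.pySetD st.2 e.2.1
     (PySem.List.pyGetD st.2 e.2.1 0 + e.2.2 - PySem.List.pyGetD (PySem.List.pyGetD st.1 e.1 []) e.2.1 0))

theorem rIdx_lt {N : ℕ} {i : Int} (h1 : -(N : Int) ≤ i) (h2 : i < N) (hN : 0 < N) : rIdx N i < N := by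
  unfold rIdx; split_ifs <;> omega

theorem pyGetD_rIdx {α : Type} (xs : List α) (i : Int) (d : α) {N : ℕ}
    (hx : xs.length = N) (h1 : -(N : Int) ≤ i) (h2 : i < N) :
    PySem.List.pyGetD xs i d = xs.getD (rIdx N i) d := by
  simp only [PySem.List.pyGetD, PySem.List.pyGet?, PySem.List.pyIdx?, rIdx, hx]
  by_cases h0 : 0 ≤ i
  · rw [if_pos h0, if_pos h0, if_pos h2]
    simp [List.getD_eq_getElem?_getD]
  · rw [if_neg h0, if_neg h0, if_pos h1]
    simp [List.getD_eq_getElem?_getD]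

theorem pySetD_rIdx {α : Type} (xs : List α) (i : Int) (v : α) {N : ℕ}
    (hx : xs.length = N) (h1 : -(N : Int) ≤ i) (h2 : i < N) :
    PySem.List.pySetD xs i v = xs.set (rIdx N i) v := by
  simp only [PySem.List.pySetD, PySem.List.pySet?, PySem.List.pyIdx?, rIdx, hx]
  by_cases h0 : 0 ≤ i
  · rw [if_pos h0, if_pos h0, if_pos h2]; simp
  · rw [if_neg h0, if_neg h0, if_pos h1]; simp

theorem sum_set_int (L : List Int) (n : ℕ) (a : Int) (h : n < L.length) :
    (L.set n a).sum = L.sum - L.getD n 0 + a := by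
  rw [List.sum_set, List.getD_eq_getElem L 0 h, if_pos h]
  have h2 : (List.take n L).sum + (List.drop n L).sum = L.sum := List.sum_take_add_sum_drop L n
  rw [List.drop_eq_getElem_cons h, List.sum_cons] at h2
  omega

theorem csum_set (G : List (List Int)) (u v : ℕ) (w : Int) {N : ℕ}
    (hG : G.length = N) (hrows : ∀ r ∈ G, r.length = N) (hu : u < N) (hv : v < N) (j : ℕ) :
    csum (G.set u ((G.getD u []).set v w)) j
      = csum G j + (if j = v then w - (G.getD u []).getD v 0 else 0) := by
  have hu' : u < G.length := hG ▸ hu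
  have hrow : (G.getD u []) = G[u] := List.getD_eq_getElem G [] hu'
  have hrl : G[u].length = N := hrows _ (List.getElem_mem hu')
  unfold csum
  rw [List.map_set, sum_set_int _ u _ (by simpa using hu')]
  have hmg : (List.map (fun r => r.getD j 0) G).getD u 0 = G[u].getD j 0 := by
    rw [List.getD_eq_getElem _ 0 (by simpa using hu'), List.getElem_map]
  rw [hmg, hrow]
  by_cases hjv : j = v
  · subst hjv
    have hw : (G[u].set j w).getD j 0 = w := by
      rw [List.getD_eq_getElem _ 0 (by simp [hrl]; omega), List.getElem_set, if_pos rfl]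
    rw [hw, if_pos rfl]
    ring
  · have : (G[u].set v w).getD j 0 = G[u].getD j 0 := by
      by_cases hj : j < N
      · rw [List.getD_eq_getElem _ 0 (by simp [hrl]; omega), List.getElem_set, if_neg (by omega),
            List.getD_eq_getElem _ 0 (by omega)]
      · rw [List.getD_eq_default _ 0 (by simp [hrl]; omega), List.getD_eq_default _ 0 (by omega)]
    rw [this, if_neg hjv]
    ring

theorem maxfold_ge (E : List (Int × Int × Int)) (a : Int) :
    a ≤ E.foldl (fun a e => max (max e.1 e.2.1) a) a ∧
    ∀ e ∈ E, e.1 ≤ E.foldl (fun a e => max (max e.1 e.2.1) a) a ∧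
             e.2.1 ≤ E.foldl (fun a e => max (max e.1 e.2.1) a) a := by
  induction E generalizing a with
  | nil => simp
  | cons e t ih =>
    simp only [List.foldl_cons]
    obtain ⟨h1, h2⟩ := ih (max (max e.1 e.2.1) a)
    refine ⟨le_trans (by simp) h1, ?_⟩
    intro f hf
    rcases List.mem_cons.mp hf with hf | hf
    · subst hf; exact ⟨le_trans (by simp) h1, le_trans (by simp) h1⟩
    · exact h2 f hf

theorem findmax_eq (E : List (Int × Int × Int)) : findmax E = pvMaxV E := by
  unfold findmax pvMaxV
  dsimp only
  rw [PySem.List.foldl_pyRange_zero_pyGetD' E (0,0,0)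
      (fun (st : Int × Int) e => (max (max e.1 e.2.1) st.1, max st.2 e.2.2)) (0,0)]
  rw [PySem.List.foldl_prod_mk (fun a (e : Int × Int × Int) => max (max e.1 e.2.1) a)
      (fun b (e : Int × Int × Int) => max b e.2.2) E 0 0]

-- a pyRange-indexed fold over xs is a fold over xs, for any bound equal to xs.length
theorem foldl_pyRange_len {α β : Type} (xs : List α) (d : α) (f : β → α → β) (init : β)
    (b : Int) (hb : b = (xs.length : Int)) :
    (PySem.List.pyRange 0 b).foldl (fun acc j => f acc (PySem.List.pyGetD xs j d)) init
      = xs.foldl f init := by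
  subst hb
  exact PySem.List.foldl_pyRange_zero_pyGetD' xs d f init

theorem map_const_pyRange (n : Int) (c : Int) :
    (PySem.List.pyRange 0 n).map (fun _ => c) = List.replicate n.toNat c := by
  rw [PySem.List.pyRange_one]
  simp [Function.comp_def, List.map_const']

theorem map_const_pyRange_list (n : Int) (c : List Int) :
    (PySem.List.pyRange 0 n).map (fun _ => c) = List.replicate n.toNat c := by
  rw [PySem.List.pyRange_one]
  simp [Function.comp_def, List.map_const']

theorem getD_replicate_zero (N j : ℕ) : (List.replicate N (0 : Int)).getD j 0 = 0 := by
  by_cases hj : j < N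
  · rw [List.getD_eq_getElem _ 0 (by simpa using hj), List.getElem_replicate]
  · rw [List.getD_eq_default _ 0 (by simpa using hj)]

theorem csum_replicate_zero (N j : ℕ) : csum (List.replicate N (List.replicate N (0 : Int))) j = 0 := by
  simp [csum, List.map_replicate, getD_replicate_zero, List.sum_replicate]

theorem inner_getD (row cap : List Int) (k : ℕ) (hk : k ≤ cap.length) :
    ((PySem.List.pyRange 0 (k : Int)).foldl (fun cap j =>
        PySem.List.pySetD cap j (PySem.List.pyGetD cap j 0 + PySem.List.pyGetD row j 0)) cap).length = cap.length ∧
    ∀ j : ℕ, ((PySem.List.pyRange 0 (k : Int)).foldl (fun cap j =>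
        PySem.List.pySetD cap j (PySem.List.pyGetD cap j 0 + PySem.List.pyGetD row j 0)) cap).getD j 0
      = if j < k then cap.getD j 0 + row.getD j 0 else cap.getD j 0 := by
  induction k with
  | zero => simp
  | succ k ih =>
    obtain ⟨ihl, ihg⟩ := ih (le_trans (Nat.le_succ k) hk)
    have hcast : ((k + 1 : ℕ) : Int) = (k : Int) + 1 := by push_cast; ring
    rw [hcast, PySem.List.pyRange_one_succ_right (by positivity), List.foldl_append]
    simp only [List.foldl_cons, List.foldl_nil]
    set L := (PySem.List.pyRange 0 (k : Int)).foldl (fun cap j =>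
        PySem.List.pySetD cap j (PySem.List.pyGetD cap j 0 + PySem.List.pyGetD row j 0)) cap with hL
    have hstep : PySem.List.pySetD L (k : Int) (PySem.List.pyGetD L (k : Int) 0 + PySem.List.pyGetD row (k : Int) 0)
        = L.set k (L.getD k 0 + row.getD k 0) := by
      simp [PySem.List.pySetD_natCast, PySem.List.pyGetD_natCast]
    rw [hstep]
    refine ⟨by simp [ihl], ?_⟩
    intro j
    rw [List.getD_eq_getElem?_getD, List.getElem?_set]
    by_cases hjk : k = j
    · subst hjk
      rw [if_pos rfl, if_pos (by omega : k < L.length)]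
      rw [Option.getD_some, ihg k, if_neg (by omega), if_pos (by omega)]
    · rw [if_neg hjk, ← List.getD_eq_getElem?_getD, ihg j]
      by_cases hlt : j < k
      · rw [if_pos hlt, if_pos (by omega)]
      · rw [if_neg hlt, if_neg (by omega)]

theorem outer_getD {N : ℕ} (G : List (List Int)) (cap : List Int)
    (hcap : cap.length = N) (hrows : ∀ r ∈ G, r.length = N) :
    (G.foldl (fun cap row => (PySem.List.pyRange 0 (N : Int)).foldl (fun cap j =>
        PySem.List.pySetD cap j (PySem.List.pyGetD cap j 0 + PySem.List.pyGetD row j 0)) cap) cap).length = N ∧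
    ∀ j : ℕ, (G.foldl (fun cap row => (PySem.List.pyRange 0 (N : Int)).foldl (fun cap j =>
        PySem.List.pySetD cap j (PySem.List.pyGetD cap j 0 + PySem.List.pyGetD row j 0)) cap) cap).getD j 0
      = cap.getD j 0 + csum G j := by
  induction G generalizing cap with
  | nil => exact ⟨hcap, by simp [csum]⟩
  | cons row t ih =>
    simp only [List.foldl_cons]
    obtain ⟨hl, hg⟩ := inner_getD row cap N (le_of_eq hcap.symm)
    have hrl : row.length = N := hrows _ (by simp)
    obtain ⟨ihl, ihg⟩ := ih (((PySem.List.pyRange 0 (N : Int)).foldl (fun cap j =>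
        PySem.List.pySetD cap j (PySem.List.pyGetD cap j 0 + PySem.List.pyGetD row j 0)) cap))
      (hl.trans hcap) (fun r hr => hrows r (by simp [hr]))
    refine ⟨ihl, ?_⟩
    intro j
    rw [ihg j, hg j]
    have hstep : (if j < N then cap.getD j 0 + row.getD j 0 else cap.getD j 0)
        = cap.getD j 0 + row.getD j 0 := by
      by_cases hj : j < N
      · rw [if_pos hj]
      · rw [if_neg hj, show row.getD j 0 = 0 from List.getD_eq_default _ 0 (by omega)]; ring
    rw [hstep]
    simp only [csum, List.map_cons, List.sum_cons]
    ring

theorem edge_fold {N : ℕ} (E' : List (Int × Int × Int)) (G : List (List Int)) (cap : List Int)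
    (hG : G.length = N) (hrows : ∀ r ∈ G, r.length = N) (hcap : cap.length = N)
    (hinv : ∀ j : ℕ, cap.getD j 0 = csum G j)
    (hE : ∀ e ∈ E', -(N : Int) ≤ e.1 ∧ e.1 < N ∧ -(N : Int) ≤ e.2.1 ∧ e.2.1 < N) (hN : 0 < N) :
    (E'.foldl stepB (G, cap)).1 = E'.foldl stepG G ∧
    (E'.foldl stepB (G, cap)).1.length = N ∧
    (∀ r ∈ (E'.foldl stepB (G, cap)).1, r.length = N) ∧
    (E'.foldl stepB (G, cap)).2.length = N ∧
    ∀ j : ℕ, (E'.foldl stepB (G, cap)).2.getD j 0 = csum (E'.foldl stepB (G, cap)).1 j := by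
  induction E' generalizing G cap with
  | nil => exact ⟨rfl, hG, hrows, hcap, hinv⟩
  | cons e t ih =>
    obtain ⟨hu1, hu2, hv1, hv2⟩ := hE e (by simp)
    have hvN : rIdx N e.2.1 < N := rIdx_lt hv1 hv2 hN
    have huN : rIdx N e.1 < N := rIdx_lt hu1 hu2 hN
    have hrow : PySem.List.pyGetD G e.1 [] = G.getD (rIdx N e.1) [] := pyGetD_rIdx G e.1 [] hG hu1 hu2
    have hrowlen : (G.getD (rIdx N e.1) []).length = N := by
      rw [List.getD_eq_getElem G [] (by omega)]
      exact hrows _ (List.getElem_mem (by omega))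
    have hG1 : stepG G e = G.set (rIdx N e.1) ((G.getD (rIdx N e.1) []).set (rIdx N e.2.1) e.2.2) := by
      unfold stepG
      rw [hrow, pySetD_rIdx _ e.2.1 _ hrowlen hv1 hv2, pySetD_rIdx _ e.1 _ hG hu1 hu2]
    have hcap1 : (stepB (G, cap) e).2 = cap.set (rIdx N e.2.1)
        (cap.getD (rIdx N e.2.1) 0 + e.2.2 - (G.getD (rIdx N e.1) []).getD (rIdx N e.2.1) 0) := by
      unfold stepB
      dsimp only
      rw [hrow, pyGetD_rIdx _ e.2.1 _ hrowlen hv1 hv2,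
          pyGetD_rIdx _ e.2.1 _ hcap hv1 hv2, pySetD_rIdx _ e.2.1 _ hcap hv1 hv2]
    have hfst : (stepB (G, cap) e).1 = stepG G e := rfl
    have hG1len : (stepG G e).length = N := by rw [hG1]; simpa using hG
    have hG1rows : ∀ r ∈ stepG G e, r.length = N := by
      rw [hG1]; intro r hr
      rcases List.mem_or_eq_of_mem_set hr with h | h
      · exact hrows r h
      · subst h; simpa using hrowlen
    have hcap1len : ((stepB (G, cap) e).2).length = N := by rw [hcap1]; simpa using hcap
    have hinv1 : ∀ j : ℕ, ((stepB (G, cap) e).2).getD j 0 = csum (stepG G e) j := by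
      intro j
      rw [hcap1, hG1, csum_set G _ _ _ hG hrows huN hvN j]
      rw [List.getD_eq_getElem?_getD, List.getElem?_set]
      by_cases hj : rIdx N e.2.1 = j
      · rw [if_pos hj, if_pos (by omega), Option.getD_some, ← hj, if_pos rfl, hinv (rIdx N e.2.1)]
        ring
      · rw [if_neg hj, ← List.getD_eq_getElem?_getD, hinv j, if_neg (fun h => hj h.symm)]
        ring
    have := ih (stepG G e) ((stepB (G, cap) e).2) hG1len hG1rows hcap1len hinv1
      (fun f hf => hE f (by simp [hf]))
    simp only [List.foldl_cons]
    have hpair : stepB (G, cap) e = (stepG G e, (stepB (G, cap) e).2) := by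
      rw [← hfst]
    rw [hpair]
    exact this

-- ===== VERDICT (by name: the statement is the Claim_ definition above) =====
theorem transform_spec : Claim_equal_transform := by
  intro E s _ hpre
  unfold Spec_transform transform transform_alt
  dsimp only
  rw [findmax_eq]
  have hBfold : E.foldl (fun a e => max (max e.1 e.2.1) a) 0 = pvMaxV E := rfl
  rw [hBfold]
  set M := pvMaxV E with hMdef
  have hM0 : 0 ≤ M := by
    have := (maxfold_ge E 0).1
    simpa [hMdef, pvMaxV] using this
  have hMge : ∀ e ∈ E, e.1 ≤ M ∧ e.2.1 ≤ M := by
    intro e he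
    have := (maxfold_ge E 0).2 e he
    simpa [hMdef, pvMaxV] using this
  set N : ℕ := (M + 2).toNat with hNdef
  have hn : ((N : ℕ) : Int) = M + 2 := Int.toNat_of_nonneg (by omega)
  have hN : 0 < N := by omega
  rw [← hn]
  simp only [map_const_pyRange, map_const_pyRange_list, PySem.List.pyRepeat_singleton,
      Int.toNat_natCast]
  rw [foldl_pyRange_len E (0,0,0)
      (fun G e => PySem.List.pySetD G e.1 (PySem.List.pySetD (PySem.List.pyGetD G e.1 []) e.2.1 e.2.2))
      (List.replicate N (List.replicate N 0)) (E.length : Int) rfl]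
  have hsg : (fun G e => PySem.List.pySetD G e.1
      (PySem.List.pySetD (PySem.List.pyGetD G e.1 []) e.2.1 e.2.2)) = stepG := rfl
  have hsb : (fun (st : List (List Int) × List Int) (e : Int × Int × Int) =>
      (PySem.List.pySetD st.1 e.1 (PySem.List.pySetD (PySem.List.pyGetD st.1 e.1 []) e.2.1 e.2.2),
       PySem.List.pySetD st.2 e.2.1
        (PySem.List.pyGetD st.2 e.2.1 0 + e.2.2 - PySem.List.pyGetD (PySem.List.pyGetD st.1 e.1 []) e.2.1 0))) = stepB := rfl
  rw [hsg, hsb]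
  have hEb : ∀ e ∈ E, -(N : Int) ≤ e.1 ∧ e.1 < N ∧ -(N : Int) ≤ e.2.1 ∧ e.2.1 < N := by
    intro e he
    obtain ⟨g1, g2⟩ := hMge e he
    obtain ⟨p1, p2⟩ := hpre e he
    rw [hn]
    exact ⟨by omega, by omega, by omega, by omega⟩
  obtain ⟨hfst, hlen, hrows, hclen, hcinv⟩ := edge_fold E
    (List.replicate N (List.replicate N 0)) (List.replicate N 0)
    (by simp) (by intro r hr; simp [List.eq_of_mem_replicate hr])
    (by simp)
    (fun j => by rw [getD_replicate_zero, csum_replicate_zero])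
    hEb hN
  rw [← hfst]
  set stB := E.foldl stepB (List.replicate N (List.replicate N 0), List.replicate N 0) with hstB
  rw [foldl_pyRange_len stB.1 []
      (fun cap row => (PySem.List.pyRange 0 (N : Int)).foldl (fun cap j =>
        PySem.List.pySetD cap j (PySem.List.pyGetD cap j 0 + PySem.List.pyGetD row j 0)) cap)
      (List.replicate N 0) (N : Int) (by rw [hlen])]
  obtain ⟨hol, hog⟩ := outer_getD (N := N) stB.1 (List.replicate N 0) (by simp) hrows
  have hcapeq : stB.1.foldl (fun cap row => (PySem.List.pyRange 0 (N : Int)).foldl (fun cap j =>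
        PySem.List.pySetD cap j (PySem.List.pyGetD cap j 0 + PySem.List.pyGetD row j 0)) cap)
        (List.replicate N 0) = stB.2 := by
    apply List.ext_getElem (by rw [hol, hclen])
    intro i h1 h2
    rw [← List.getD_eq_getElem _ 0 h1, ← List.getD_eq_getElem _ 0 h2, hog i, hcinv i,
        getD_replicate_zero]
    ring
  rw [hcapeq]
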